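-- pv_equiv track=rewrite | github.com/nguyentritai/platform_scripts | qs_addressing/addr_routing.py | set_bit32
-- ===== SOURCE A (Python) =====
-- def set_bit32(cur, start, count):
--   v = cur
--   for i in range(0, 31):
--     if (i < start):
--       continue
--     if (i > start + count):
--       break
--     v |= (1 << i)
--   return v
-- ===== SOURCE B (Python) =====
-- def set_bit32(cur, start, count):
--     lo = max(start, 0)
--     hi = min(start + count, 30)
--     if lo > hi:
--         return cur
--     return cur | (((1 << (hi - lo + 1)) - 1) << lo)
-- ===== Notes on version B (the rewrite author's own statement) =====
-- stated objective: faster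
-- what changed: Replaced the 31-iteration bit-by-bit loop with a single closed-form bitmask ((1 << (hi-lo+1)) - 1) << lo over the clamped range lo = max(start,0), hi = min(start+count,30), OR-ed into cur once.
import Mathlib
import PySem

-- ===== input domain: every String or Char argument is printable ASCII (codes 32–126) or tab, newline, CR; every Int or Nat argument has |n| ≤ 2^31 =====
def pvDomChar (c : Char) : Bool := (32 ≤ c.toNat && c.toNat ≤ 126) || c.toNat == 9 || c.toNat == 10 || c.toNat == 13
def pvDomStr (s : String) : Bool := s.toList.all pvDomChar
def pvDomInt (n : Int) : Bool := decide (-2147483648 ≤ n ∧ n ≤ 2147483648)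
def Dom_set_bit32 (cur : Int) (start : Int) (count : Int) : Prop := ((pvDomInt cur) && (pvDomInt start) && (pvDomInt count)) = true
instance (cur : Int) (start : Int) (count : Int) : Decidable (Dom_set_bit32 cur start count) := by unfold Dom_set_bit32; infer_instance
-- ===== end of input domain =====

-- B replaces A's 31-iteration bit-by-bit loop with one closed-form bitmask OR-ed into cur (objective: faster, constant factor).

-- ===== PORT A =====
-- the for-loop with continue/break, as structural recursion over the range list
def setLoopA (start count : Int) : List Int → Int → Int
  | [], v => v
  | i :: rest, v =>
    if i < start then setLoopA start count rest v
    else if i > start + count then v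
    else setLoopA start count rest (PySem.Int.bor v ((1 : Int) <<< i.toNat))

def set_bit32 (cur : Int) (start : Int) (count : Int) : Int :=
  setLoopA start count (PySem.List.pyRange 0 31 1) cur

-- ===== PORT B =====
def set_bit32_alt (cur : Int) (start : Int) (count : Int) : Int :=
  let lo := max start 0
  let hi := min (start + count) 30
  if lo > hi then cur
  else PySem.Int.bor cur (((1 <<< (hi - lo + 1).toNat) - 1) <<< lo.toNat)

-- ===== PRECONDITION & SPEC =====
def Spec_set_bit32 (cur : Int) (start : Int) (count : Int) (out : Int) : Prop := out = set_bit32_alt cur start count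
instance (cur : Int) (start : Int) (count : Int) (out : Int) : Decidable (Spec_set_bit32 cur start count out) := by unfold Spec_set_bit32; infer_instance

-- ===== CLAIM (what is proved, stated in full; the proofs are below) =====
def Claim_equal_set_bit32 : Prop := ∀ (cur : Int) (start : Int) (count : Int), Dom_set_bit32 cur start count → Spec_set_bit32 cur start count (set_bit32 cur start count)

-- ===== LEMMAS AND PROOFS =====

-- m &&& b plus the bits of m not in b recover m
theorem pv_and_add_ldiff (m b : ℕ) : (m &&& b) + Nat.ldiff m b = m := by
  induction m using Nat.binaryRec generalizing b with
  | zero => simp [Nat.ldiff, Nat.bitwise_zero_left]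
  | bit a n ih =>
    rw [← Nat.bit_bodd_div2 b, Nat.land_bit, Nat.ldiff_bit]
    have := ih b.div2
    cases a <;> cases hb : b.bodd <;>
      simp only [Nat.bit, Bool.and_true, Bool.and_false, Bool.not_true, Bool.not_false,
        cond_true, cond_false] <;> omega

theorem pv_sub_and (m b : ℕ) : m - (m &&& b) = Nat.ldiff m b := by
  have := pv_and_add_ldiff m b; omega

theorem pv_ldiff_ldiff (m b c : ℕ) : Nat.ldiff (Nat.ldiff m b) c = Nat.ldiff m (b ||| c) :=
  Nat.eq_of_testBit_eq fun i => by
    simp only [Nat.testBit_ldiff, Nat.testBit_lor]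
    cases m.testBit i <;> cases b.testBit i <;> cases c.testBit i <;> rfl

-- folding two nonnegative ORs into one (Python's | on an arbitrary-sign accumulator)
theorem pv_bor_bor_natCast (a : Int) (b c : ℕ) :
    PySem.Int.bor (PySem.Int.bor a (b : Int)) (c : Int) = PySem.Int.bor a ((b ||| c : ℕ) : Int) := by
  by_cases ha : 0 ≤ a
  · rw [PySem.Int.bor_of_nonneg ha (by positivity), Int.toNat_natCast]
    rw [PySem.Int.bor_natCast, PySem.Int.bor_of_nonneg ha (by positivity), Int.toNat_natCast]
    rw [Nat.lor_assoc]
  · have h1 : PySem.Int.bor a (b : Int) =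
        -((((-a - 1).toNat - ((-a - 1).toNat &&& b) : ℕ)) : Int) - 1 := by
      simp [PySem.Int.bor, ha, Int.toNat_natCast]
    have h2 : PySem.Int.bor a ((b ||| c : ℕ) : Int) =
        -((((-a - 1).toNat - ((-a - 1).toNat &&& (b ||| c)) : ℕ)) : Int) - 1 := by
      simp [PySem.Int.bor, ha, Int.toNat_natCast]
    rw [h1, h2]
    set m : ℕ := (-a - 1).toNat with hm
    have hneg : ¬ (0 : Int) ≤ -((m - (m &&& b) : ℕ) : Int) - 1 := by
      have : (0:Int) ≤ ((m - (m &&& b) : ℕ) : Int) := by positivity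
      omega
    have h3 : (-(-((m - (m &&& b) : ℕ) : Int) - 1) - 1) = ((m - (m &&& b) : ℕ) : Int) := by ring
    simp only [PySem.Int.bor, hneg, if_false, Nat.cast_nonneg, if_true, h3, Int.toNat_natCast]
    rw [pv_sub_and m b, pv_sub_and, pv_ldiff_ldiff, pv_sub_and]

theorem pv_bor_zero_nat (a : Int) : PySem.Int.bor a ((0 : ℕ) : Int) = a := by
  rw [Nat.cast_zero, PySem.Int.bor_zero]

-- A's loop with the comparison bounds clamped to the range actually traversed
def setLoopC (s e : Int) : List Int → Int → Int
  | [], v => v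
  | i :: rest, v =>
    if i < s then setLoopC s e rest v
    else if i > e then v
    else setLoopC s e rest (PySem.Int.bor v ((1 : Int) <<< i.toNat))

-- the bits A's loop ORs in, as a natural number
def maskC (s e : Int) : List Int → ℕ
  | [] => 0
  | i :: rest =>
    if i < s then maskC s e rest
    else if i > e then 0
    else (1 <<< i.toNat) ||| maskC s e rest

theorem pv_loop_congr (start count : Int) : ∀ (l : List Int) (v : Int),
    (∀ i ∈ l, 0 ≤ i ∧ i ≤ 30) →
    setLoopA start count l v
      = setLoopC (min (max start 0) 31) (max (min (start + count) 30) (-1)) l v := by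
  intro l
  induction l with
  | nil => intro v _; rfl
  | cons i rest ih =>
    intro v hmem
    have hi : 0 ≤ i ∧ i ≤ 30 := hmem i (List.mem_cons_self ..)
    have hrest : ∀ j ∈ rest, 0 ≤ j ∧ j ≤ 30 := fun j hj => hmem j (List.mem_cons_of_mem _ hj)
    simp only [setLoopA, setLoopC]
    by_cases hc1 : i < start
    · rw [if_pos hc1, if_pos (by omega : i < min (max start 0) 31)]
      exact ih v hrest
    · rw [if_neg hc1, if_neg (by omega : ¬ i < min (max start 0) 31)]
      by_cases hc2 : i > start + count
      · rw [if_pos hc2, if_pos (by omega : i > max (min (start + count) 30) (-1))]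
      · rw [if_neg hc2, if_neg (by omega : ¬ i > max (min (start + count) 30) (-1))]
        exact ih _ hrest

theorem pv_shl_cast (i : Int) : ((1 <<< i.toNat : ℕ) : Int) = (1 : Int) <<< i.toNat := by
  rw [Nat.shiftLeft_eq, Int.shiftLeft_eq]; push_cast; ring

theorem pv_loop_factor (s e : Int) : ∀ (l : List Int) (v : Int),
    setLoopC s e l v = PySem.Int.bor v ((maskC s e l : ℕ) : Int) := by
  intro l
  induction l with
  | nil => intro v; simp only [setLoopC, maskC, pv_bor_zero_nat]
  | cons i rest ih =>
    intro v
    simp only [setLoopC, maskC]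
    split_ifs with hc1 hc2
    · exact ih v
    · simp only [pv_bor_zero_nat]
    · rw [ih, ← pv_bor_bor_natCast, pv_shl_cast]

theorem pv_mask_val : ∀ (s e : Fin 32),
    ((maskC (s.val : Int) ((e.val : Int) - 1) (PySem.List.pyRange 0 31 1) : ℕ) : Int)
      = if ((s.val : Int) > (e.val : Int) - 1) then ((0 : ℕ) : Int)
        else (((((1 <<< (((e.val : Int) - 1) - (s.val : Int) + 1).toNat) - 1) <<< ((s.val : Int)).toNat : ℕ)) : Int) := by
  decide

theorem set_bit32_spec_aux (cur start count : Int) :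
    set_bit32 cur start count = set_bit32_alt cur start count := by
  have hmem : ∀ i ∈ PySem.List.pyRange 0 31 1, (0:Int) ≤ i ∧ i ≤ 30 := by
    intro i hi
    rw [PySem.List.mem_pyRange_one] at hi
    omega
  set s' : Int := min (max start 0) 31 with hs'
  set e' : Int := max (min (start + count) 30) (-1) with he'
  have hs'b : 0 ≤ s' ∧ s' ≤ 31 := by omega
  have he'b : -1 ≤ e' ∧ e' ≤ 30 := by omega
  have hmask := pv_mask_val ⟨s'.toNat, by omega⟩ ⟨(e' + 1).toNat, by omega⟩
  simp only at hmask
  have hcs : ((s'.toNat : ℕ) : Int) = s' := by omega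
  have hce : (((e' + 1).toNat : ℕ) : Int) - 1 = e' := by omega
  rw [hcs, hce] at hmask
  rw [set_bit32, pv_loop_congr start count _ cur hmem, ← hs', ← he', pv_loop_factor, hmask]
  rw [set_bit32_alt]
  by_cases hlt : max start 0 > min (start + count) 30
  · have hgt : s' > e' := by omega
    rw [if_pos hgt, if_pos hlt, Nat.cast_zero, PySem.Int.bor_zero]
  · have hgt : ¬ s' > e' := by omega
    rw [if_neg hgt, if_neg hlt]
    have hlo : s' = max start 0 := by omega
    have hhi : e' = min (start + count) 30 := by omega
    rw [hlo, hhi]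

-- ===== VERDICT (by name: the statement is the Claim_ definition above) =====
theorem set_bit32_spec : Claim_equal_set_bit32 := by
  intro cur start count _
  unfold Spec_set_bit32
  exact set_bit32_spec_aux cur start count
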